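-- pv_equiv track=rewrite | github.com/stuck-inadream/penguin-tester | src/reward_cvr.py | dual_check
-- ===== SOURCE A (Python) =====
-- def dual_check(prompt: str, candidates):
--     pairs = 0
--     disag = 0
--     for i in range(len(candidates)):
--         for j in range(i+1, len(candidates)):
--             pairs += 1
--             if candidates[i] != candidates[j]:
--                 disag += 1
--     return {"pairs_checked": pairs, "disagreements": disag}
-- ===== SOURCE B (Python) =====
-- def dual_check(prompt: str, candidates):
--     n = len(candidates)
--     counts = {}
--     for v in candidates:
--         counts[v] = counts.get(v, 0) + 1
--     same = 0
--     for c in counts.values():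
--         same += c * (c - 1) // 2
--     pairs = n * (n - 1) // 2
--     return {"pairs_checked": pairs, "disagreements": pairs - same}
-- ===== Notes on version B (the rewrite author's own statement) =====
-- stated objective: faster
-- what changed: Replaces the O(n^2) double loop over index pairs with a single frequency-counting pass: pairs = C(n,2) in closed form and disagreements = C(n,2) minus the sum of C(c,2) over the value counts.
import Mathlib
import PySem

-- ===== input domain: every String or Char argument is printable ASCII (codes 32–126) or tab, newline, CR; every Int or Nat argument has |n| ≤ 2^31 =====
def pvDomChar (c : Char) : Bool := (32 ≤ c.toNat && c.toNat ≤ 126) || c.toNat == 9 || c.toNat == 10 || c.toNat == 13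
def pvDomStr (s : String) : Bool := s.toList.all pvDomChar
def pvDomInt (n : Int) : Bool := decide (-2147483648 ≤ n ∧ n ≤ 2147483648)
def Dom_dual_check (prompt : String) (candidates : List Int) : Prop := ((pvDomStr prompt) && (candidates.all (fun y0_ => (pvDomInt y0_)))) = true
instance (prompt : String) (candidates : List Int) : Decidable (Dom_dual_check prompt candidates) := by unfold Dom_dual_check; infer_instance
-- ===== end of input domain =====

-- B replaces A's double loop over index pairs by a single frequency-counting pass with
-- closed-form pair counts (objective: faster).

-- ===== PORT A =====
-- A: nested for-loops over index pairs i < j, counting pairs and disagreements.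
def dual_check (prompt : String) (candidates : List Int) : List (String × Int) :=
  let st : Int × Int :=
    (PySem.List.pyRange 0 (candidates.length : Int) 1).foldl (fun st i =>
      (PySem.List.pyRange (i + 1) (candidates.length : Int) 1).foldl (fun st j =>
        (st.1 + 1,
         if PySem.List.pyGetD candidates i 0 ≠ PySem.List.pyGetD candidates j 0 then st.2 + 1 else st.2)) st)
      (0, 0)
  [("pairs_checked", st.1), ("disagreements", st.2)]

-- ===== PORT B =====
-- B: one pass builds a frequency dict; pairs = n(n-1)//2, disagreements = pairs - Σ c(c-1)//2.
def dual_check_alt (prompt : String) (candidates : List Int) : List (String × Int) :=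
  let n : Int := candidates.length
  let counts : PySem.Dict Int Int :=
    candidates.foldl (fun d v => d.insert v (d.getD v 0 + 1)) PySem.Dict.empty
  let same : Int := counts.values.foldl (fun s c => s + PySem.Int.floordiv (c * (c - 1)) 2) 0
  let pairs : Int := PySem.Int.floordiv (n * (n - 1)) 2
  [("pairs_checked", pairs), ("disagreements", pairs - same)]

-- ===== PRECONDITION & SPEC =====
def Spec_dual_check (prompt : String) (candidates : List Int) (out : List (String × Int)) : Prop := out = dual_check_alt prompt candidates
instance (prompt : String) (candidates : List Int) (out : List (String × Int)) : Decidable (Spec_dual_check prompt candidates out) := by unfold Spec_dual_check; infer_instance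

-- ===== CLAIM (what is proved, stated in full; the proofs are below) =====
def Claim_equal_dual_check : Prop := ∀ (prompt : String) (candidates : List Int), Dom_dual_check prompt candidates → Spec_dual_check prompt candidates (dual_check prompt candidates)

-- ===== LEMMAS AND PROOFS =====

-- triangular number C(n,2)
def triN : Nat → Nat
  | 0 => 0
  | n + 1 => triN n + n

-- number of equal unordered pairs, head-vs-tail recursion
def eqRecN : List Int → Nat
  | [] => 0
  | x :: t => t.count x + eqRecN t

-- number of disagreeing unordered pairs, head-vs-tail recursion
def disagN : List Int → Nat
  | [] => 0
  | x :: t => t.countP (fun v => x ≠ v) + disagN t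

-- total number of unordered pairs, head-vs-tail recursion
def totN : List Int → Nat
  | [] => 0
  | _ :: t => t.length + totN t

theorem tri_cast (n : Nat) : 2 * (triN n : Int) = (n : Int) * ((n : Int) - 1) := by
  induction n with
  | zero => simp [triN]
  | succ n ih => push_cast [triN]; linear_combination ih

theorem floordiv_tri (n : Nat) :
    PySem.Int.floordiv ((n : Int) * ((n : Int) - 1)) 2 = (triN n : Int) := by
  have h := tri_cast n
  rw [show ((n : Int) * ((n : Int) - 1)) = 2 * (triN n : Int) from h.symm]
  rw [PySem.Int.floordiv_eq_iff_of_pos (by norm_num)]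
  omega

theorem totN_eq_triN (xs : List Int) : totN xs = triN xs.length := by
  induction xs with
  | nil => rfl
  | cons x t ih => simp [totN, triN, ih]; omega

theorem countP_count (x : Int) (t : List Int) :
    t.countP (fun v => x ≠ v) + t.count x = t.length := by
  induction t with
  | nil => rfl
  | cons v t ih =>
    by_cases h : x = v
    · simp [h, List.countP_cons, List.count_cons] at *; omega
    · simp [List.countP_cons, List.count_cons, h, Ne.symm h] at *; omega

theorem disag_plus_eq (xs : List Int) : disagN xs + eqRecN xs = totN xs := by
  induction xs with
  | nil => rfl
  | cons x t ih =>
    have h := countP_count x t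
    simp only [disagN, eqRecN, totN]
    omega

theorem innerFold (x : Int) (t : List Int) (p d : Int) :
    t.foldl (fun st v => (st.1 + 1, if x ≠ v then st.2 + 1 else st.2)) (p, d)
      = (p + (t.length : Int), d + (t.countP (fun v => x ≠ v) : Int)) := by
  induction t generalizing p d with
  | nil => simp
  | cons v t ih =>
    simp only [List.foldl_cons]
    by_cases h : x = v
    · rw [if_neg (not_not_intro h), ih]
      have hc : (v :: t).countP (fun w => x ≠ w) = t.countP (fun w => x ≠ w) := by
        simp [h]
      rw [hc, Prod.mk.injEq]
      constructor <;> push_cast [List.length_cons] <;> ring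
    · rw [if_pos h, ih]
      have hc : (v :: t).countP (fun w => x ≠ w) = t.countP (fun w => x ≠ w) + 1 := by
        simp [List.countP_cons, h]
      rw [hc, Prod.mk.injEq]
      constructor <;> push_cast [List.length_cons] <;> ring

theorem outerLoop (m : Nat) (L : List Int) (a : Int) (ha : 0 ≤ a)
    (hm : a + m = L.length) (init : Int × Int) :
    (PySem.List.pyRange a (L.length : Int) 1).foldl (fun st i =>
        (PySem.List.pyRange (i + 1) (L.length : Int) 1).foldl (fun st j =>
          (st.1 + 1,
           if PySem.List.pyGetD L i 0 ≠ PySem.List.pyGetD L j 0 then st.2 + 1 else st.2)) st)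
      init
    = (init.1 + (totN (L.drop a.toNat) : Int), init.2 + (disagN (L.drop a.toNat) : Int)) := by
  induction m generalizing a init with
  | zero =>
    have hlen : a = (L.length : Int) := by omega
    rw [PySem.List.pyRange_one_eq_nil (le_of_eq hlen.symm)]
    have hd : L.drop a.toNat = [] := List.drop_eq_nil_of_le (by omega)
    simp [hd, totN, disagN]
  | succ m ih =>
    have hlt : a < (L.length : Int) := by omega
    have hA : a.toNat < L.length := by omega
    rw [PySem.List.pyRange_one_cons hlt]
    simp only [List.foldl_cons]
    have hget : PySem.List.pyGetD L a 0 = L[a.toNat] :=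
      PySem.List.pyGetD_eq_getElem (xs := L) (d := 0) ha hlt
    rw [PySem.List.foldl_pyRange_pyGetD' L 0
        (fun st v => (st.1 + 1, if PySem.List.pyGetD L a 0 ≠ v then st.2 + 1 else st.2)) init
        (a := a + 1) (by omega)]
    rw [hget, innerFold]
    rw [ih (a + 1) (by omega) (by omega)]
    have hdrop : L.drop a.toNat = L[a.toNat] :: L.drop (a.toNat + 1) :=
      List.drop_eq_getElem_cons hA
    have htn : (a + 1).toNat = a.toNat + 1 := by omega
    rw [htn, hdrop]
    simp only [totN, disagN]
    rw [Prod.mk.injEq]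
    constructor <;> push_cast <;> ring

theorem A_closed (prompt : String) (xs : List Int) :
    dual_check prompt xs
      = [("pairs_checked", (totN xs : Int)), ("disagreements", (disagN xs : Int))] := by
  simp only [dual_check]
  rw [outerLoop xs.length xs 0 (by omega) (by omega) (0, 0)]
  simp

theorem B_shape (xs : List Int) :
    (xs.foldl (fun d v => d.insert v (d.getD v 0 + 1)) PySem.Dict.empty).values.foldl
        (fun s c => s + PySem.Int.floordiv (c * (c - 1)) 2) 0
      = ((PySem.Set.ofList xs).map (fun v => (triN (xs.count v) : Int))).sum := by
  rw [PySem.Dict.foldl_insert_getD_add_one_eq_counter]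
  simp only [PySem.Dict.values, PySem.Dict.items_counter, List.map_map]
  rw [PySem.List.foldl_add, zero_add, List.map_map]
  apply congrArg
  apply List.map_congr_left
  intro v _
  simp only [Function.comp]
  exact floordiv_tri (xs.count v)

theorem sumEq (xs : List Int) : ∀ S : List Int, S.Nodup → (∀ v, v ∈ S ↔ v ∈ xs) →
    (S.map (fun v => (triN (xs.count v) : Int))).sum = (eqRecN xs : Int) := by
  induction xs with
  | nil =>
    intro S _ hmem
    have : S = [] := List.eq_nil_iff_forall_not_mem.mpr (fun a ha => by simpa using (hmem a).mp ha)
    simp [this, eqRecN]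
  | cons x t ih =>
    intro S hnd hmem
    have hxS : x ∈ S := (hmem x).mpr List.mem_cons_self
    have hperm : S.Perm (x :: S.erase x) := List.perm_cons_erase hxS
    have herase_ne : ∀ v ∈ S.erase x, v ≠ x := by
      intro v hv
      exact (List.Nodup.mem_erase_iff hnd |>.mp hv).1
    have hcount_ne : ∀ v ∈ S.erase x, (x :: t).count v = t.count v := by
      intro v hv
      simp [(herase_ne v hv).symm]
    have hmape : (S.erase x).map (fun v => (triN ((x :: t).count v) : Int))
        = (S.erase x).map (fun v => (triN (t.count v) : Int)) := by
      apply List.map_congr_left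
      intro v hv; rw [hcount_ne v hv]
    have hsum := (hperm.map (fun v => (triN ((x :: t).count v) : Int))).sum_eq
    by_cases hxt : x ∈ t
    · have hmem' : ∀ v, v ∈ S ↔ v ∈ t := by
        intro v
        rw [hmem v, List.mem_cons]
        exact ⟨fun h => h.elim (fun he => he ▸ hxt) id, Or.inr⟩
      have hIH := ih S hnd hmem'
      have hsumt := (hperm.map (fun v => (triN (t.count v) : Int))).sum_eq
      rw [hsumt] at hIH
      rw [hsum]
      simp only [List.map_cons, List.sum_cons] at hIH ⊢
      rw [hmape]
      have hcx : (x :: t).count x = t.count x + 1 := by simp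
      rw [hcx]
      have htri : (triN (t.count x + 1) : Int) = (triN (t.count x) : Int) + (t.count x : Int) := by
        push_cast [triN]; ring
      rw [htri]
      simp only [eqRecN]
      push_cast
      linarith [hIH]
    · have herase_mem' : ∀ v, v ∈ S.erase x ↔ v ∈ t := by
        intro v
        rw [List.Nodup.mem_erase_iff hnd, hmem v, List.mem_cons]
        constructor
        · rintro ⟨hne, (rfl | h)⟩
          · exact absurd rfl hne
          · exact h
        · intro h; exact ⟨fun he => hxt (he ▸ h), Or.inr h⟩
      have hIH := ih (S.erase x) (hnd.erase x) herase_mem'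
      rw [hsum]
      simp only [List.map_cons, List.sum_cons]
      rw [hmape, hIH]
      have hcx : (x :: t).count x = 1 := by
        simp [List.count_eq_zero_of_not_mem hxt]
      rw [hcx]
      simp only [eqRecN, List.count_eq_zero_of_not_mem hxt]
      simp [triN]

theorem B_closed (prompt : String) (xs : List Int) :
    dual_check_alt prompt xs
      = [("pairs_checked", (totN xs : Int)), ("disagreements", (disagN xs : Int))] := by
  simp only [dual_check_alt]
  rw [B_shape]
  rw [sumEq xs (PySem.Set.ofList xs) (PySem.Set.nodup_ofList xs)
      (fun v => PySem.Set.mem_ofList xs v)]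
  rw [floordiv_tri xs.length, ← totN_eq_triN]
  have h := disag_plus_eq xs
  have : (totN xs : Int) - (eqRecN xs : Int) = (disagN xs : Int) := by omega
  rw [this]

-- ===== VERDICT (by name: the statement is the Claim_ definition above) =====
theorem dual_check_spec : Claim_equal_dual_check := by
  intro prompt candidates _
  unfold Spec_dual_check
  rw [A_closed, B_closed]
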